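-- pv_equiv track=rewrite | github.com/ddobokki/KoTNT | raw_transcripts_preproc/transcripts_preprocess.py | __get_domain_to_dirs_dict
-- ===== SOURCE A (Python) =====
-- from typing import DefaultDict, Dict, List, Union
-- from collections import defaultdict
--
-- def __get_domain_to_dirs_dict(main_domains: List[str], dirs: List[str]) -> DefaultDict[str, List]:
--     """
--     메인 도메인별 폴더 패스 리스트를 가진 dict을 반환
--
--     ex)
--     dir_paths: [
--         '.../D20/G02/S000009',
--         '.../D20/G02/S000010',
--         '.../D21/G02/S000008',
--         '.../D21/G02/S000009',
--         '.../D21/G02/S000010',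
--         ]
--
--     main_domains:
--     ['D20','D21']
--
--     return: {
--         D20:[
--             '.../D20/G02/S000009',
--             '.../D20/G02/S000010',
--             ]
--         D21:[
--             '.../D21/G02/S000008'
--             '.../D21/G02/S000009',
--             '.../D21/G02/S000010',
--             ]
--         }
--     """
--     main_domains.sort()
--     dirs.sort()
--
--     domain_to_dirs_dict = defaultdict(list)
--
--     # two pointer
--     dir_idx = 0
--     main_domains_idx = 0
--
--     while dir_idx < len(dirs) and main_domains_idx < len(main_domains):
--         while dir_idx < len(dirs):
--             main_domain = main_domains[main_domains_idx]
--             dir_path = dirs[dir_idx]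
--             if main_domain in dir_path:
--                 break
--             else:
--                 dir_idx += 1
--             # ex) main_domain이 D22라면 D22 문자열을 가진 폴더의 인덱스까지 idx를 이동
--
--         # 현재 dir_idx: main_domain을 포함하는 문자열의 path의 첫번째 idx
--         while dir_idx < len(dirs):
--             main_domain = main_domains[main_domains_idx]
--             dir_path = dirs[dir_idx]
--             if main_domain in dir_path:
--                 # 현재 도메인을 포함하는 path일 경우 append
--                 domain_to_dirs_dict[main_domain].append(dir_path)
--                 dir_idx += 1
--             else:
--                 break
--
--         main_domains_idx += 1
--
--     return domain_to_dirs_dict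
-- ===== SOURCE B (Python) =====
-- from typing import DefaultDict, Dict, List, Union
-- from collections import defaultdict
--
-- def __get_domain_to_dirs_dict(main_domains: List[str], dirs: List[str]) -> DefaultDict[str, List]:
--     """Dirs-driven single pass: instead of A's domains-driven outer loop with nested
--     skip/collect while-loops, walk the sorted dirs once with an iterator over the
--     sorted domains and a 'collecting' flag; a dir that breaks a collected run advances
--     the domain iterator and is rechecked once against the new domain.
--     Sorts both arguments in place like A."""
--     main_domains.sort()
--     dirs.sort()
--
--     domain_to_dirs_dict = defaultdict(list)
--
--     domains = iter(main_domains)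
--     domain = next(domains, None)
--     collecting = False
--     for path in dirs:
--         if domain is None:
--             break
--         if domain in path:
--             domain_to_dirs_dict[domain].append(path)
--             collecting = True
--         elif collecting:
--             domain = next(domains, None)
--             collecting = False
--             if domain is not None and domain in path:
--                 domain_to_dirs_dict[domain].append(path)
--                 collecting = True
--     return domain_to_dirs_dict
-- ===== Notes on version B (the rewrite author's own statement) =====
-- stated objective: alternative
-- what changed: A's domains-driven outer while with nested skip-phase/collect-phase inner while-loops is replaced by a single dirs-driven for-loop: one pass over the sorted dirs with an iterator over the sorted domains and a 'collecting' flag, where a dir that ends a collected run advances the domain iterator and is rechecked once inline.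
import Mathlib
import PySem

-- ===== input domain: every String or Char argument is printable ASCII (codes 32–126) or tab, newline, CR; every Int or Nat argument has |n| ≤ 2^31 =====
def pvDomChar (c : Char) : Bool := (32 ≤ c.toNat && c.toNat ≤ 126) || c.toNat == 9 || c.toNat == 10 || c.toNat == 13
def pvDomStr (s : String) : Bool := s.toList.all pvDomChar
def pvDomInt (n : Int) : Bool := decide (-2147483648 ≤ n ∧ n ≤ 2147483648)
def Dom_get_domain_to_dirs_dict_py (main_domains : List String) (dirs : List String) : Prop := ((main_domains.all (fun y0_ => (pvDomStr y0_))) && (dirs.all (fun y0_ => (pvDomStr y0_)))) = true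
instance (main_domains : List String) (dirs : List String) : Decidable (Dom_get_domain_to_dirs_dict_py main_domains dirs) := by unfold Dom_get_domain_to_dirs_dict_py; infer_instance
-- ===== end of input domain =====

-- B replaces A's domains-driven outer while (with nested skip-phase / collect-phase inner
-- while-loops over dir indices) by a single dirs-driven for-loop carrying a domain iterator
-- and a 'collecting' flag; same return value ("alternative" objective). Both A and B sort
-- the two argument lists in place via .sort(); the equivalence proved is about the return value.


-- ===== PORT A =====
-- first inner while: advance dir_idx past dirs not containing main_domain
-- (fuel only makes the recursion structural; it is called with enough fuel to never run out)
def pvSkipA (dirs : List String) (d : String) : Nat → Nat → Nat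
  | 0, di => di
  | fuel + 1, di =>
    if h : di < dirs.length then
      if PySem.Str.isIn d dirs[di] then di else pvSkipA dirs d fuel (di + 1)
    else di

-- second inner while: append dirs containing main_domain to the defaultdict entry
def pvCollectA (dirs : List String) (d : String) :
    Nat → Nat → PySem.Dict String (List String) → Nat × PySem.Dict String (List String)
  | 0, di, dict => (di, dict)
  | fuel + 1, di, dict =>
    if h : di < dirs.length then
      if PySem.Str.isIn d dirs[di] then
        pvCollectA dirs d fuel (di + 1) (dict.modify d [] (· ++ [dirs[di]]))
      else (di, dict)
    else (di, dict)

-- outer while over (dir_idx, main_domains_idx)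
def pvLoopA (domains dirs : List String) :
    Nat → Nat → Nat → PySem.Dict String (List String) → PySem.Dict String (List String)
  | 0, _, _, dict => dict
  | fuel + 1, mi, di, dict =>
    if di < dirs.length ∧ mi < domains.length then
      let d := domains.getD mi ""
      let r := pvCollectA dirs d dirs.length (pvSkipA dirs d dirs.length di) dict
      pvLoopA domains dirs fuel (mi + 1) r.1 r.2
    else dict

def get_domain_to_dirs_dict_py (main_domains : List String) (dirs : List String) :
    List (String × List String) :=
  (pvLoopA (PySem.List.sorted main_domains (fun x => x)) (PySem.List.sorted dirs (fun x => x))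
    (PySem.List.sorted main_domains (fun x => x)).length 0 0 PySem.Dict.empty).items

-- ===== PORT B =====
-- B's single for-loop over the sorted dirs; 'doms' is the domain iterator (head = current
-- domain, [] = the iterator returned None), 'collecting' the flag, structural on dirs
def pvLoopB : List String → List String → Bool → PySem.Dict String (List String) →
    PySem.Dict String (List String)
  | _, [], _, dict => dict
  | doms, path :: rest, collecting, dict =>
    match doms with
    | [] => dict
    | d :: ds =>
      if PySem.Str.isIn d path then
        pvLoopB (d :: ds) rest true (dict.modify d [] (· ++ [path]))
      else if collecting then
        match ds with
        | [] => dict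
        | d' :: ds' =>
          if PySem.Str.isIn d' path then
            pvLoopB (d' :: ds') rest true (dict.modify d' [] (· ++ [path]))
          else pvLoopB (d' :: ds') rest false dict
      else pvLoopB (d :: ds) rest false dict

def get_domain_to_dirs_dict_py_alt (main_domains : List String) (dirs : List String) :
    List (String × List String) :=
  (pvLoopB (PySem.List.sorted main_domains (fun x => x)) (PySem.List.sorted dirs (fun x => x))
    false PySem.Dict.empty).items

-- ===== PRECONDITION & SPEC =====
def Spec_get_domain_to_dirs_dict_py (main_domains : List String) (dirs : List String) (out : List (String × List String)) : Prop := out = get_domain_to_dirs_dict_py_alt main_domains dirs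
instance (main_domains : List String) (dirs : List String) (out : List (String × List String)) : Decidable (Spec_get_domain_to_dirs_dict_py main_domains dirs out) := by unfold Spec_get_domain_to_dirs_dict_py; infer_instance

-- ===== CLAIM (what is proved, stated in full; the proofs are below) =====
def Claim_equal_get_domain_to_dirs_dict_py : Prop := ∀ (main_domains : List String) (dirs : List String), Dom_get_domain_to_dirs_dict_py main_domains dirs → Spec_get_domain_to_dirs_dict_py main_domains dirs (get_domain_to_dirs_dict_py main_domains dirs)

-- ===== LEMMAS AND PROOFS =====

-- characterisation of A's skip phase
theorem pvSkipA_spec (dirs : List String) (d : String) :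
    ∀ fuel di, dirs.length - di ≤ fuel → di ≤ dirs.length →
    pvSkipA dirs d fuel di =
      di + ((dirs.drop di).takeWhile (fun p => !PySem.Str.isIn d p)).length := by
  intro fuel
  induction fuel with
  | zero =>
    intro di h1 h2
    have hdi : di = dirs.length := by omega
    subst hdi
    simp [pvSkipA, List.drop_length]
  | succ n ih =>
    intro di h1 h2
    by_cases hd : di < dirs.length
    · rw [pvSkipA, dif_pos hd, List.drop_eq_getElem_cons hd, List.takeWhile_cons]
      by_cases hin : PySem.Str.isIn d dirs[di] = true
      · have hc : PySem.Chars.isIn d.toList dirs[di].toList = true := by simpa using hin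
        rw [if_pos hin]
        simp [hc]
      · have hc : PySem.Chars.isIn d.toList dirs[di].toList = false := by simpa using hin
        rw [if_neg hin, ih (di + 1) (by omega) (by omega)]
        simp [hc]
        omega
    · have hdi : di = dirs.length := by omega
      subst hdi
      simp [pvSkipA, List.drop_length]

-- characterisation of A's collect phase
theorem pvCollectA_spec (dirs : List String) (d : String) :
    ∀ fuel di (dict : PySem.Dict String (List String)), dirs.length - di ≤ fuel →
    di ≤ dirs.length →
    pvCollectA dirs d fuel di dict =
      (di + ((dirs.drop di).takeWhile (fun p => PySem.Str.isIn d p)).length,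
       ((dirs.drop di).takeWhile (fun p => PySem.Str.isIn d p)).foldl
         (fun dd y => dd.modify d [] (· ++ [y])) dict) := by
  intro fuel
  induction fuel with
  | zero =>
    intro di dict h1 h2
    have hdi : di = dirs.length := by omega
    subst hdi
    simp [pvCollectA, List.drop_length]
  | succ n ih =>
    intro di dict h1 h2
    by_cases hd : di < dirs.length
    · rw [pvCollectA, dif_pos hd, List.drop_eq_getElem_cons hd, List.takeWhile_cons]
      by_cases hin : PySem.Str.isIn d dirs[di] = true
      · rw [if_pos hin, ih (di + 1) _ (by omega) (by omega), if_pos hin]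
        simp only [List.length_cons, List.foldl_cons, Prod.mk.injEq, and_true]
        omega
      · have hc : PySem.Chars.isIn d.toList dirs[di].toList = false := by simpa using hin
        rw [if_neg hin]
        simp [hc]
    · have hdi : di = dirs.length := by omega
      subst hdi
      simp [pvCollectA, List.drop_length]

-- A's outer loop is inert once dir_idx has reached len(dirs)
theorem pvLoopA_exhausted (doms dirs : List String) :
    ∀ fuel mi (dict : PySem.Dict String (List String)),
    pvLoopA doms dirs fuel mi dirs.length dict = dict := by
  intro fuel mi dict
  cases fuel with
  | zero => rfl
  | succ n => rw [pvLoopA, if_neg (by omega)]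

-- pvLoopB with any domain list returns the dict unchanged on empty dirs
theorem pvLoopB_nil (doms : List String) (c : Bool) (dict : PySem.Dict String (List String)) :
    pvLoopB doms [] c dict = dict := by
  cases doms <;> rfl

-- B with collecting = False skips the non-matching prefix of dirs unchanged
theorem pvLoopB_skip (d : String) (ds : List String) :
    ∀ (dirs : List String) (dict : PySem.Dict String (List String)),
    pvLoopB (d :: ds) dirs false dict =
      pvLoopB (d :: ds) (dirs.dropWhile (fun p => !PySem.Str.isIn d p)) false dict := by
  intro dirs
  induction dirs with
  | nil => intro dict; simp
  | cons path rest ih =>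
    intro dict
    by_cases hin : PySem.Str.isIn d path = true
    · have hc : PySem.Chars.isIn d.toList path.toList = true := by simpa using hin
      rw [List.dropWhile_cons, if_neg (by simp [PySem.Str.isIn, hc])]
    · have hc : PySem.Chars.isIn d.toList path.toList = false := by simpa using hin
      rw [List.dropWhile_cons, if_pos (by simp [PySem.Str.isIn, hc]), ← ih dict]
      simp [pvLoopB, PySem.Str.isIn, hc]

-- B collects the matching run of dirs into the dict and sets the flag (if the run is nonempty)
theorem pvLoopB_collect (d : String) (ds : List String) :
    ∀ (dirs : List String) (c : Bool) (dict : PySem.Dict String (List String)),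
    pvLoopB (d :: ds) dirs c dict =
      pvLoopB (d :: ds) (dirs.dropWhile (fun p => PySem.Str.isIn d p))
        (c || !(dirs.takeWhile (fun p => PySem.Str.isIn d p)).isEmpty)
        ((dirs.takeWhile (fun p => PySem.Str.isIn d p)).foldl
          (fun dd y => dd.modify d [] (· ++ [y])) dict) := by
  intro dirs
  induction dirs with
  | nil => intro c dict; simp
  | cons path rest ih =>
    intro c dict
    by_cases hin : PySem.Str.isIn d path = true
    · have hc : PySem.Chars.isIn d.toList path.toList = true := by simpa using hin
      rw [List.dropWhile_cons, List.takeWhile_cons]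
      simp only [PySem.Str.isIn, hc, if_true, List.foldl_cons, List.isEmpty_cons,
        Bool.not_false, Bool.or_true]
      rw [show pvLoopB (d :: ds) (path :: rest) c dict =
            pvLoopB (d :: ds) rest true (dict.modify d [] (· ++ [path])) by
          simp [pvLoopB, PySem.Str.isIn, hc]]
      rw [ih true (dict.modify d [] (· ++ [path]))]
      simp
    · have hc : PySem.Chars.isIn d.toList path.toList = false := by simpa using hin
      rw [List.dropWhile_cons, List.takeWhile_cons]
      simp [PySem.Str.isIn, hc]

-- once the current run is over (head fails the match), the flag advances the domain iterator:
-- B at (d :: ds, collecting = True) equals B at (ds, collecting = False)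
theorem pvLoopB_reset (d : String) (ds : List String) (dirs : List String)
    (dict : PySem.Dict String (List String))
    (h : ∀ path rest, dirs = path :: rest → PySem.Str.isIn d path = false) :
    pvLoopB (d :: ds) dirs true dict = pvLoopB ds dirs false dict := by
  cases dirs with
  | nil => simp [pvLoopB_nil]
  | cons path rest =>
    have hc : PySem.Chars.isIn d.toList path.toList = false := by simpa using h path rest rfl
    cases ds with
    | nil => simp [pvLoopB, PySem.Str.isIn, hc]
    | cons d' ds' =>
      by_cases h2 : PySem.Chars.isIn d'.toList path.toList = true
      · simp [pvLoopB, PySem.Str.isIn, hc, h2]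
      · have h2' : PySem.Chars.isIn d'.toList path.toList = false := by simpa using h2
        simp [pvLoopB, PySem.Str.isIn, hc, h2']

-- the head of dropWhile fails the predicate
theorem pvHeadDrop {α : Type} (p : α → Bool) :
    ∀ (l : List α) (x : α) (xs : List α), l.dropWhile p = x :: xs → p x = false := by
  intro l
  induction l with
  | nil => intro x xs h; simp [List.dropWhile_nil] at h
  | cons y ys ih =>
    intro x xs h
    rw [List.dropWhile_cons] at h
    by_cases hp : p y = true
    · rw [if_pos hp] at h; exact ih x xs h
    · rw [if_neg hp] at h
      obtain ⟨rfl, _⟩ := List.cons.injEq .. ▸ h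
      simpa using hp

-- dropping the matched prefix = dropWhile
theorem pvDropTake {α : Type} (p : α → Bool) :
    ∀ (l : List α), l.drop (l.takeWhile p).length = l.dropWhile p := by
  intro l
  induction l with
  | nil => simp
  | cons x xs ih =>
    rw [List.takeWhile_cons, List.dropWhile_cons]
    by_cases hp : p x = true
    · simp [hp, ih]
    · simp [hp]

-- the two loops compute the same dict
theorem pvLoop_eq : ∀ (fuel : Nat) (doms dirs : List String) (mi di : Nat)
    (dict : PySem.Dict String (List String)), doms.length - mi ≤ fuel → di ≤ dirs.length →
    pvLoopA doms dirs fuel mi di dict = pvLoopB (doms.drop mi) (dirs.drop di) false dict := by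
  intro fuel
  induction fuel with
  | zero =>
    intro doms dirs mi di dict h1 h2
    have hmi : doms.length ≤ mi := by omega
    rw [List.drop_eq_nil_of_le hmi]
    cases hdd : dirs.drop di with
    | nil => rfl
    | cons x xs => rfl
  | succ n ih =>
    intro doms dirs mi di dict h1 h2
    by_cases hm : mi < doms.length
    · by_cases hd : di < dirs.length
      · have hgd : doms.getD mi "" = doms[mi] := List.getD_eq_getElem _ _ hm
        set d := doms.getD mi "" with hdd
        have hdoms : doms.drop mi = d :: doms.drop (mi + 1) := by
          rw [List.drop_eq_getElem_cons hm, ← hgd]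
        set rest := dirs.drop di with hrest
        have hrestlen : rest.length = dirs.length - di := by
          rw [hrest, List.length_drop]
        set i := (rest.takeWhile (fun p => !PySem.Str.isIn d p)).length with hi
        have hile : i ≤ rest.length := by
          rw [hi]; exact (List.takeWhile_prefix _).length_le
        have hskip := pvSkipA_spec dirs d dirs.length di (by omega) (le_of_lt hd)
        rw [← hrest, ← hi] at hskip
        have hdropi : dirs.drop (di + i) = rest.dropWhile (fun p => !PySem.Str.isIn d p) := by
          rw [← pvDropTake (fun p => !PySem.Str.isIn d p) rest, ← hi, hrest, List.drop_drop]
        have hcol := pvCollectA_spec dirs d dirs.length (di + i) dict (by omega) (by omega)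
        set run := ((dirs.drop (di + i)).takeWhile (fun p => PySem.Str.isIn d p)) with hrun
        have hrunle : run.length ≤ dirs.length - (di + i) := by
          rw [hrun]
          calc ((dirs.drop (di + i)).takeWhile (fun p => PySem.Str.isIn d p)).length
              ≤ (dirs.drop (di + i)).length := (List.takeWhile_prefix _).length_le
            _ = dirs.length - (di + i) := List.length_drop
        have hAstep : pvLoopA doms dirs (n + 1) mi di dict =
            pvLoopA doms dirs n (mi + 1) (di + i + run.length)
              (run.foldl (fun dd y => dd.modify d [] (· ++ [y])) dict) := by
          rw [pvLoopA, if_pos ⟨hd, hm⟩]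
          dsimp only
          rw [← hdd, hskip, hcol]
        have hBskip : pvLoopB (doms.drop mi) rest false dict =
            pvLoopB (d :: doms.drop (mi + 1)) (dirs.drop (di + i)) false dict := by
          rw [hdoms, pvLoopB_skip, ← hdropi]
        cases hdd2 : dirs.drop (di + i) with
        | nil =>
          have hrunnil : run = [] := by rw [hrun, hdd2]; rfl
          have hdi' : di + i = dirs.length := by
            have := congrArg List.length hdd2
            simp [List.length_drop] at this
            omega
          rw [hAstep, hrunnil]
          simp only [List.foldl_nil, List.length_nil, Nat.add_zero]
          rw [hdi', pvLoopA_exhausted, hBskip, hdd2, pvLoopB_nil]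
        | cons q qs =>
          have hq : PySem.Str.isIn d q = true := by
            have := pvHeadDrop (fun p => !PySem.Str.isIn d p) rest q qs (by rw [← hdropi, hdd2])
            simpa using this
          have hqc : PySem.Chars.isIn d.toList q.toList = true := by simpa using hq
          have hrunc : run = q :: qs.takeWhile (fun p => PySem.Str.isIn d p) := by
            rw [hrun, hdd2, List.takeWhile_cons, if_pos hq]
          have hrest2 : (dirs.drop (di + i)).dropWhile (fun p => PySem.Str.isIn d p) =
              dirs.drop (di + i + run.length) := by
            rw [← pvDropTake (fun p => PySem.Str.isIn d p) (dirs.drop (di + i)), ← hrun,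
              List.drop_drop]
          set dict' := run.foldl (fun dd y => dd.modify d [] (· ++ [y])) dict with hdict'
          have hBcol : pvLoopB (d :: doms.drop (mi + 1)) (dirs.drop (di + i)) false dict =
              pvLoopB (d :: doms.drop (mi + 1)) (dirs.drop (di + i + run.length)) true dict' := by
            rw [pvLoopB_collect, ← hrun, hrest2, ← hdict']
            congr 1
            rw [hrunc]
            simp
          have hBreset : pvLoopB (d :: doms.drop (mi + 1)) (dirs.drop (di + i + run.length))
              true dict' = pvLoopB (doms.drop (mi + 1)) (dirs.drop (di + i + run.length))
              false dict' := by
            apply pvLoopB_reset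
            intro path rest' hsplit
            have := pvHeadDrop (fun p => PySem.Str.isIn d p) (dirs.drop (di + i)) path rest'
              (by rw [hrest2, hsplit])
            simpa using this
          rw [hAstep, ih doms dirs (mi + 1) (di + i + run.length) dict'
            (by omega) (by omega)]
          rw [hBskip, hBcol, hBreset]
      · have hdi : di = dirs.length := by omega
        subst hdi
        rw [pvLoopA_exhausted, List.drop_length, pvLoopB_nil]
    · rw [List.drop_eq_nil_of_le (by omega), pvLoopA, if_neg (by omega)]
      cases hdd : dirs.drop di with
      | nil => rfl
      | cons x xs => rfl

-- ===== VERDICT (by name: the statement is the Claim_ definition above) =====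
theorem get_domain_to_dirs_dict_py_spec : Claim_equal_get_domain_to_dirs_dict_py := by
  intro main_domains dirs _
  unfold Spec_get_domain_to_dirs_dict_py get_domain_to_dirs_dict_py get_domain_to_dirs_dict_py_alt
  have := pvLoop_eq (PySem.List.sorted main_domains (fun x => x)).length
    (PySem.List.sorted main_domains (fun x => x)) (PySem.List.sorted dirs (fun x => x))
    0 0 PySem.Dict.empty (by omega) (by omega)
  simpa using congrArg PySem.Dict.items this
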